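-- pv_equiv track=rewrite | github.com/pwiecz/pyiflabel | treatyofbabel/ifiction.py | munge_html
-- ===== SOURCE A (Python) =====
-- def munge_html(ifiction):
--     """Munge various HTML tags to not be interpreted as XML data.
--
--     For example, '<b>' will be replaced with '&lt;b&gt;'.
--
--     Args:
--         ifiction: a string containing the IFiction XML
--     Returns:
--         The ifiction string with HTML tags properly escaped.
--
--     """
--     html_tags = {'<b>': '&lt;b&gt;', '</b>': '&lt;&#47;b&gt;',
--                  '<i>': '&lt;i&gt;', '</i>': '&lt;&#47;i&gt;',
--                  '<p>': '&lt;p&gt;', '</p>': '&lt;&#47;p&gt;',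
--                  '<br/>': '&lt;br&#47;&gt;', '<br />': '&lt;br&#47;&gt;'}
--     for tag, subs in html_tags.items():
--         ifiction = ifiction.replace(tag, subs)
--     return ifiction
-- ===== SOURCE B (Python) =====
-- def munge_html(ifiction):
--     """Munge various HTML tags to not be interpreted as XML data.
--
--     Single left-to-right scan: at each '<' try the eight known tags
--     and emit the escaped form of the first (unique) one that matches.
--     """
--     table = {'<b>': '&lt;b&gt;', '</b>': '&lt;&#47;b&gt;',
--              '<i>': '&lt;i&gt;', '</i>': '&lt;&#47;i&gt;',
--              '<p>': '&lt;p&gt;', '</p>': '&lt;&#47;p&gt;',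
--              '<br/>': '&lt;br&#47;&gt;', '<br />': '&lt;br&#47;&gt;'}
--     out = []
--     i = 0
--     n = len(ifiction)
--     while i < n:
--         if ifiction[i] == '<':
--             for tag, sub in table.items():
--                 if ifiction.startswith(tag, i):
--                     out.append(sub)
--                     i += len(tag)
--                     break
--             else:
--                 out.append(ifiction[i])
--                 i += 1
--         else:
--             out.append(ifiction[i])
--             i += 1
--     return ''.join(out)
-- ===== Notes on version B (the rewrite author's own statement) =====
-- stated objective: alternative
-- what changed: replaces A's eight sequential whole-string str.replace passes by a single left-to-right scan that matches the known tags against a lookup table and emits the escaped form of the one that matches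
import Mathlib
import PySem

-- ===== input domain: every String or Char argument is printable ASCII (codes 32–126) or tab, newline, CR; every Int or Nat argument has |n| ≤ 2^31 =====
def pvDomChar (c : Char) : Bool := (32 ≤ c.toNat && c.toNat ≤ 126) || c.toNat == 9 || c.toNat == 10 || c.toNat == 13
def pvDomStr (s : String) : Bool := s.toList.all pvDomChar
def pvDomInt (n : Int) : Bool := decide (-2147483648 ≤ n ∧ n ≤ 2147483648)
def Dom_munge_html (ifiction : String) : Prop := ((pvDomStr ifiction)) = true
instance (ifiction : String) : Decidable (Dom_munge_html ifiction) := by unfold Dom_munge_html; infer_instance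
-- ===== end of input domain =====

-- B replaces A's eight sequential whole-string replace passes by a single left-to-right
-- scan with a tag lookup table (alternative structure, same result).

-- ===== PORT A =====
def munge_html (ifiction : String) : String :=
  -- dict literal → association list in insertion order; the for-loop over .items() → foldl
  let html_tags : List (String × String) :=
    [("<b>", "&lt;b&gt;"), ("</b>", "&lt;&#47;b&gt;"),
     ("<i>", "&lt;i&gt;"), ("</i>", "&lt;&#47;i&gt;"),
     ("<p>", "&lt;p&gt;"), ("</p>", "&lt;&#47;p&gt;"),
     ("<br/>", "&lt;br&#47;&gt;"), ("<br />", "&lt;br&#47;&gt;")]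
  html_tags.foldl (fun s p => PySem.Str.replace s p.1 p.2) ifiction

-- ===== PORT B =====
-- the table Source B builds (tag, escaped form), as lists of characters
def tagTable : List (List Char × List Char) :=
  [("<b>".toList, "&lt;b&gt;".toList), ("</b>".toList, "&lt;&#47;b&gt;".toList),
   ("<i>".toList, "&lt;i&gt;".toList), ("</i>".toList, "&lt;&#47;i&gt;".toList),
   ("<p>".toList, "&lt;p&gt;".toList), ("</p>".toList, "&lt;&#47;p&gt;".toList),
   ("<br/>".toList, "&lt;br&#47;&gt;".toList), ("<br />".toList, "&lt;br&#47;&gt;".toList)]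

-- Source B's while loop: at '<' try the table entries in order (the for/break), else copy the char
def scanAux : List Char → List Char
  | [] => []
  | c :: t =>
    if c = '<' then
      match h : tagTable.find? (fun p => p.1.isPrefixOf (c :: t)) with
      | some p => p.2 ++ scanAux ((c :: t).drop p.1.length)
      | none => c :: scanAux t
    else c :: scanAux t
termination_by cs => cs.length
decreasing_by
  · have hm := List.mem_of_find?_eq_some h
    have hlen : 0 < p.1.length := by
      simp only [tagTable, List.mem_cons, List.not_mem_nil, or_false] at hm
      rcases hm with rfl | rfl | rfl | rfl | rfl | rfl | rfl | rfl <;> decide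
    simp only [List.length_drop, List.length_cons]
    omega
  · simp only [List.length_cons]; omega
  · simp only [List.length_cons]; omega

def munge_html_alt (ifiction : String) : String :=
  String.ofList (scanAux ifiction.toList)

-- ===== PRECONDITION & SPEC =====
def Spec_munge_html (ifiction : String) (out : String) : Prop := out = munge_html_alt ifiction
instance (ifiction : String) (out : String) : Decidable (Spec_munge_html ifiction out) := by unfold Spec_munge_html; infer_instance

-- ===== CLAIM (what is proved, stated in full; the proofs are below) =====
def Claim_equal_munge_html : Prop := ∀ (ifiction : String), Dom_munge_html ifiction → Spec_munge_html ifiction (munge_html ifiction)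

-- ===== LEMMAS AND PROOFS =====

-- the fold A performs, on the character-list side
def replFold (T : List (List Char × List Char)) (cs : List Char) : List Char :=
  T.foldl (fun s p => PySem.Chars.replace s p.1 p.2) cs

-- unfolding lemmas for PySem.Chars.replace.go
theorem go_zero (old new l acc : List Char) :
    PySem.Chars.replace.go old new 0 l acc = acc.reverse ++ l := by
  rw [PySem.Chars.replace.go]

theorem go_succ_nil (old new acc : List Char) (n : Nat) :
    PySem.Chars.replace.go old new (n + 1) [] acc = acc.reverse := rfl

theorem go_succ_cons (old new : List Char) (fuel : Nat) (c : Char) (t acc : List Char) :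
    PySem.Chars.replace.go old new (fuel + 1) (c :: t) acc =
      if old.isPrefixOf (c :: t) then
        PySem.Chars.replace.go old new fuel ((c :: t).drop old.length) (new.reverse ++ acc)
      else PySem.Chars.replace.go old new fuel t (c :: acc) := by
  rw [PySem.Chars.replace.go]

theorem replace_eq_go (s old new : List Char) (hold : old ≠ []) :
    PySem.Chars.replace s old new = PySem.Chars.replace.go old new s.length s [] := by
  simp [PySem.Chars.replace, hold]

-- normalisation of PySem.Chars.replace.go: the accumulator splits off
theorem go_acc (old new : List Char) (hold : old ≠ []) :
    ∀ fuel l acc, l.length ≤ fuel →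
      PySem.Chars.replace.go old new fuel l acc =
        acc.reverse ++ PySem.Chars.replace.go old new l.length l [] := by
  have holdlen : 0 < old.length := List.length_pos_iff.mpr hold
  intro fuel
  induction fuel using Nat.strong_induction_on with
  | _ fuel IH =>
    match fuel with
    | 0 =>
      intro l acc hle
      have hl : l = [] := List.eq_nil_of_length_eq_zero (Nat.le_zero.mp hle)
      subst hl
      simp [go_zero]
    | (n+1) =>
      intro l acc hle
      match l with
      | [] => simp [go_succ_nil, go_zero]
      | c :: t =>
        have hlt : t.length ≤ n := by simpa using hle
        rw [go_succ_cons]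
        conv_rhs => rw [show (c :: t).length = t.length + 1 from rfl, go_succ_cons]
        by_cases hp : old.isPrefixOf (c :: t)
        · simp only [hp, if_true]
          have hdl : ((c :: t).drop old.length).length ≤ t.length := by
            simp only [List.length_drop, List.length_cons]; omega
          rw [IH n (by omega) _ _ (le_trans hdl hlt),
              IH t.length (by omega) _ _ hdl]
          simp
        · simp only [hp, if_false, Bool.false_eq_true]
          rw [IH n (by omega) t _ hlt, IH t.length (by omega) t [c] le_rfl]
          simp

-- the three recursion equations of replace (old nonempty)
theorem replace_nil (old new : List Char) (hold : old ≠ []) :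
    PySem.Chars.replace [] old new = [] := by
  rw [replace_eq_go [] old new hold]
  simp [go_zero]

theorem replace_pos (old new s : List Char) (hold : old ≠ [])
    (hpre : old.isPrefixOf s = true) :
    PySem.Chars.replace s old new = new ++ PySem.Chars.replace (s.drop old.length) old new := by
  have holdlen : 0 < old.length := List.length_pos_iff.mpr hold
  match s with
  | [] =>
    exfalso
    have h1 := List.isPrefixOf_iff_prefix.mp hpre
    exact hold (List.prefix_nil.mp h1)
  | c :: t =>
    rw [replace_eq_go _ old new hold]
    rw [show (c :: t).length = t.length + 1 from rfl, go_succ_cons]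
    simp only [hpre, if_true]
    have hdl : ((c :: t).drop old.length).length ≤ t.length := by
      simp only [List.length_drop, List.length_cons]; omega
    rw [go_acc old new hold t.length _ _ hdl]
    rw [replace_eq_go _ old new hold]
    simp

theorem replace_neg (old new : List Char) (c : Char) (t : List Char)
    (h : old.isPrefixOf (c :: t) = false) :
    PySem.Chars.replace (c :: t) old new = c :: PySem.Chars.replace t old new := by
  have hold : old ≠ [] := by
    intro he; subst he; simp [List.isPrefixOf] at h
  rw [replace_eq_go _ old new hold]
  rw [show (c :: t).length = t.length + 1 from rfl, go_succ_cons]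
  simp only [h, if_false, Bool.false_eq_true]
  rw [go_acc old new hold t.length t [c] le_rfl]
  rw [replace_eq_go _ old new hold]
  simp

-- replace skips over a region it cannot match into
theorem replace_append (old new : List Char) :
    ∀ x r, (∀ k, k < x.length → old.isPrefixOf ((x ++ r).drop k) = false) →
      PySem.Chars.replace (x ++ r) old new = x ++ PySem.Chars.replace r old new := by
  intro x
  induction x with
  | nil => intro r _; simp
  | cons c x' IH =>
    intro r h
    have h0 : old.isPrefixOf (c :: (x' ++ r)) = false := by
      have := h 0 (by simp)
      simpa using this
    rw [List.cons_append, replace_neg old new c (x' ++ r) h0]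
    rw [IH r (fun k hk => by
      have := h (k + 1) (by simpa using Nat.succ_lt_succ hk)
      simpa using this)]
    simp

-- and so does a whole fold of replaces
theorem foldl_replace_append (T : List (List Char × List Char)) (x : List Char)
    (h : ∀ p ∈ T, ∀ r k, k < x.length → p.1.isPrefixOf ((x ++ r).drop k) = false) :
    ∀ r, replFold T (x ++ r) = x ++ replFold T r := by
  induction T with
  | nil => intro r; simp [replFold]
  | cons p T' IH =>
    intro r
    simp only [replFold, List.foldl_cons]
    rw [replace_append p.1 p.2 x r (h p List.mem_cons_self r)]
    exact IH (fun q hq => h q (List.mem_cons_of_mem _ hq)) _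

-- region instance (i): a block without '<' cannot start a tag match
theorem noMatch_of_no_lt (t x : List Char) (hx : '<' ∉ x) (hth : t.head? = some '<') :
    ∀ r k, k < x.length → t.isPrefixOf ((x ++ r).drop k) = false := by
  intro r k hk
  obtain ⟨t', rfl⟩ : ∃ t', t = '<' :: t' := by
    match t with
    | [] => simp at hth
    | a :: t' =>
      simp only [List.head?_cons, Option.some.injEq] at hth
      exact ⟨t', by rw [hth]⟩
  rw [List.drop_append_of_le_length (le_of_lt hk), List.drop_eq_getElem_cons hk]
  have hne : x[k] ≠ '<' := fun he => hx (he ▸ List.getElem_mem hk)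
  simp only [List.cons_append, List.isPrefixOf]
  simp [Ne.symm hne]

-- region instance (ii): a tag region matches no OTHER tag (prefix-freeness)
theorem noMatch_of_not_prefix (t x : List Char) (x0 : Char) (xt : List Char)
    (hx : x = x0 :: xt) (hxt : '<' ∉ xt) (hth : t.head? = some '<')
    (h1 : ¬ t <+: x) (h2 : ¬ x <+: t) :
    ∀ r k, k < x.length → t.isPrefixOf ((x ++ r).drop k) = false := by
  intro r k hk
  match k with
  | 0 =>
    simp only [List.drop_zero]
    rw [Bool.eq_false_iff]
    intro hp
    have hp' : t <+: x ++ r := List.isPrefixOf_iff_prefix.mp hp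
    have hx' : x <+: x ++ r := List.prefix_append x r
    rcases le_total t.length x.length with hle | hle
    · exact h1 (List.prefix_of_prefix_length_le hp' hx' hle)
    · exact h2 (List.prefix_of_prefix_length_le hx' hp' hle)
  | (j+1) =>
    subst hx
    have hj : j < xt.length := by simpa using hk
    have := noMatch_of_no_lt t xt hxt hth r j hj
    simpa using this

-- decided facts about the eight table entries
theorem tag_facts : ∀ p ∈ tagTable, p.1.head? = some '<' ∧ '<' ∉ p.1.tail ∧
    '&' ∉ p.1.tail ∧ p.2.head? = some '&' ∧ '<' ∉ p.2 ∧ p.1 ≠ [] := by decide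

theorem tag_not_prefix : ∀ p ∈ tagTable, ∀ q ∈ tagTable, p.1 ≠ q.1 →
    ¬ p.1 <+: q.1 ∧ ¬ q.1 <+: p.1 := by decide

theorem tag_fst_nodup : (tagTable.map Prod.fst).Nodup := by decide

-- replFold of the empty string is empty
theorem replFold_nil (T : List (List Char × List Char)) (h : ∀ p ∈ T, p.1 ≠ []) :
    replFold T [] = [] := by
  induction T with
  | nil => rfl
  | cons p T' IH =>
    simp only [replFold, List.foldl_cons]
    rw [replace_nil p.1 p.2 (h p List.mem_cons_self)]
    exact IH fun q hq => h q (List.mem_cons_of_mem _ hq)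

-- replacing cannot CREATE a prefix made of tag-tail characters
theorem preserve_prefix (qt old new : List Char) (hold : old ≠ []) (hq1 : '&' ∉ qt)
    (hnew : new.head? = some '&') :
    ∀ s, qt <+: PySem.Chars.replace s old new → qt <+: s := by
  intro s
  induction s generalizing qt with
  | nil =>
    intro h
    rw [replace_nil old new hold] at h
    exact h
  | cons c t IH =>
    intro h
    by_cases hp : old.isPrefixOf (c :: t)
    · rw [replace_pos old new (c :: t) hold hp] at h
      match qt, h with
      | [], _ => exact List.nil_prefix
      | q0 :: qt', h =>
        exfalso
        obtain ⟨n', rfl⟩ : ∃ n', new = '&' :: n' := by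
          match new with
          | [] => simp at hnew
          | a :: n' =>
            simp only [List.head?_cons, Option.some.injEq] at hnew
            exact ⟨n', by rw [hnew]⟩
        have : q0 = '&' := (List.cons_prefix_cons.mp h).1
        exact hq1 (this ▸ List.mem_cons_self)
    · rw [replace_neg old new c t (Bool.eq_false_iff.mpr hp)] at h
      match qt, h with
      | [], _ => exact List.nil_prefix
      | q0 :: qt', h =>
        obtain ⟨rfl, h'⟩ := List.cons_prefix_cons.mp h
        have := IH (qt := qt') (fun hm => hq1 (List.mem_cons_of_mem _ hm)) h'
        exact List.cons_prefix_cons.mpr ⟨rfl, this⟩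

-- A's fold on a string starting with an unmatched '<'
theorem fold_no_match (s : List Char)
    (h : ∀ p ∈ tagTable, p.1.isPrefixOf ('<' :: s) = false) :
    replFold tagTable ('<' :: s) = '<' :: replFold tagTable s := by
  suffices H : ∀ (T : List (List Char × List Char)), (∀ p ∈ T, p ∈ tagTable) →
      ∀ s, (∀ p ∈ T, p.1.isPrefixOf ('<' :: s) = false) →
        replFold T ('<' :: s) = '<' :: replFold T s from
    H tagTable (fun _ h => h) s h
  intro T
  induction T with
  | nil => intro _ s _; simp [replFold]
  | cons p T' IH =>
    intro hT s h
    have hfp := tag_facts p (hT p List.mem_cons_self)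
    simp only [replFold, List.foldl_cons]
    rw [replace_neg p.1 p.2 '<' s (h p List.mem_cons_self)]
    have hT' : ∀ q ∈ T', q ∈ tagTable := fun q hq => hT q (List.mem_cons_of_mem _ hq)
    refine IH hT' (PySem.Chars.replace s p.1 p.2) ?_
    intro q hq
    have hfq := tag_facts q (hT' q hq)
    obtain ⟨qt, hq1⟩ : ∃ qt, q.1 = '<' :: qt := by
      match hm : q.1 with
      | [] => rw [hm] at hfq; simp at hfq
      | a :: qt =>
        have := hfq.1
        rw [hm] at this
        simp only [List.head?_cons, Option.some.injEq] at this
        exact ⟨qt, by rw [this]⟩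
    rw [Bool.eq_false_iff]
    intro hpre
    have hpre' : q.1 <+: '<' :: PySem.Chars.replace s p.1 p.2 :=
      List.isPrefixOf_iff_prefix.mp hpre
    rw [hq1] at hpre'
    have hqt : qt <+: PySem.Chars.replace s p.1 p.2 := (List.cons_prefix_cons.mp hpre').2
    have hqts : qt <+: s := by
      have hamp : '&' ∉ qt := by
        have := hfq.2.2.1; rw [hq1] at this; simpa using this
      exact preserve_prefix qt p.1 p.2 hfp.2.2.2.2.2 hamp hfp.2.2.2.1 s hqt
    have hcontra : q.1.isPrefixOf ('<' :: s) = true := by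
      rw [List.isPrefixOf_iff_prefix, hq1]
      exact List.cons_prefix_cons.mpr ⟨rfl, hqts⟩
    rw [h q (List.mem_cons_of_mem _ hq)] at hcontra
    exact Bool.false_ne_true hcontra

-- A's fold on a string starting with a matched tag
theorem fold_step (cs : List Char) (p : List Char × List Char) (hmem : p ∈ tagTable)
    (hpre : p.1.isPrefixOf cs = true) :
    replFold tagTable cs = p.2 ++ replFold tagTable (cs.drop p.1.length) := by
  obtain ⟨T₁, T₂, hT⟩ := List.append_of_mem hmem
  obtain ⟨rest, hrest⟩ := List.isPrefixOf_iff_prefix.mp hpre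
  have hfp := tag_facts p hmem
  have hdrop : cs.drop p.1.length = rest := by
    rw [← hrest, List.drop_left]
  obtain ⟨pt, hp1⟩ : ∃ pt, p.1 = '<' :: pt := by
    match hm : p.1 with
    | [] => rw [hm] at hfp; simp at hfp
    | a :: pt =>
      have := hfp.1
      rw [hm] at this
      simp only [List.head?_cons, Option.some.injEq] at this
      exact ⟨pt, by rw [this]⟩
  have hmemT1 : ∀ q ∈ T₁, q ∈ tagTable := fun q hq => by
    rw [hT]; exact List.mem_append_left _ hq
  have hmemT2 : ∀ q ∈ T₂, q ∈ tagTable := fun q hq => by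
    rw [hT]; exact List.mem_append_right _ (List.mem_cons_of_mem _ hq)
  have hneq : ∀ q ∈ T₁, q.1 ≠ p.1 := by
    intro q hq he
    have hnod := tag_fst_nodup
    rw [hT, List.map_append, List.map_cons] at hnod
    have hmapq : p.1 ∈ T₁.map Prod.fst := by
      rw [← he]; exact List.mem_map_of_mem hq
    exact (List.nodup_cons.mp (List.nodup_middle.mp hnod)).1 (List.mem_append_left _ hmapq)
  -- step 1: the first tags leave the p.1-region alone
  have h1 : replFold T₁ (p.1 ++ rest) = p.1 ++ replFold T₁ rest := by
    refine foldl_replace_append T₁ p.1 ?_ rest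
    intro q hq r k hk
    have hnp := tag_not_prefix q (hmemT1 q hq) p hmem (hneq q hq)
    exact noMatch_of_not_prefix q.1 p.1 '<' pt hp1
      (by have := hfp.2.1; rw [hp1] at this; simpa using this)
      (tag_facts q (hmemT1 q hq)).1 hnp.1 hnp.2 r k hk
  -- step 2: p itself fires
  have h2 : PySem.Chars.replace (p.1 ++ replFold T₁ rest) p.1 p.2 =
      p.2 ++ PySem.Chars.replace (replFold T₁ rest) p.1 p.2 := by
    rw [replace_pos p.1 p.2 _ hfp.2.2.2.2.2
      (List.isPrefixOf_iff_prefix.mpr (List.prefix_append _ _)), List.drop_left]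
  -- step 3: the later tags leave the p.2-region alone
  have h3 : replFold T₂ (p.2 ++ PySem.Chars.replace (replFold T₁ rest) p.1 p.2) =
      p.2 ++ replFold T₂ (PySem.Chars.replace (replFold T₁ rest) p.1 p.2) := by
    refine foldl_replace_append T₂ p.2 ?_ _
    intro q hq r k hk
    exact noMatch_of_no_lt q.1 p.2 hfp.2.2.2.2.1 (tag_facts q (hmemT2 q hq)).1 r k hk
  calc replFold tagTable cs
      = replFold T₂ (PySem.Chars.replace (replFold T₁ cs) p.1 p.2) := by
        rw [hT]; simp [replFold, List.foldl_append]
    _ = p.2 ++ replFold T₂ (PySem.Chars.replace (replFold T₁ rest) p.1 p.2) := by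
        rw [← hrest] at *; rw [h1, h2, h3]
    _ = p.2 ++ replFold tagTable rest := by
        rw [hT]; simp [replFold, List.foldl_append]
    _ = p.2 ++ replFold tagTable (cs.drop p.1.length) := by rw [hdrop]

-- A's fold on a string starting with an ordinary character
theorem fold_cons_ne (c : Char) (hc : c ≠ '<') (s : List Char) :
    replFold tagTable (c :: s) = c :: replFold tagTable s := by
  have := foldl_replace_append tagTable [c]
    (fun q hq r k hk => by
      have hk0 : k = 0 := by simpa using hk
      subst hk0
      have hfq := tag_facts q hq
      obtain ⟨qt, hq1⟩ : ∃ qt, q.1 = '<' :: qt := by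
        match hm : q.1 with
        | [] => rw [hm] at hfq; simp at hfq
        | a :: qt =>
          have := hfq.1
          rw [hm] at this
          simp only [List.head?_cons, Option.some.injEq] at this
          exact ⟨qt, by rw [this]⟩
      rw [hq1]
      simp only [List.drop_zero, List.cons_append, List.nil_append, List.isPrefixOf]
      simp [Ne.symm hc]) s
  simpa using this

-- equation lemmas for scanAux
theorem scanAux_nil : scanAux [] = [] := by rw [scanAux]

set_option maxHeartbeats 1000000 in
theorem scanAux_cons (c : Char) (t : List Char) :
    scanAux (c :: t) =
      if c = '<' then
        match tagTable.find? (fun p => p.1.isPrefixOf (c :: t)) with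
        | some p => p.2 ++ scanAux ((c :: t).drop p.1.length)
        | none => c :: scanAux t
      else c :: scanAux t := by
  rw [scanAux]
  by_cases hc : c = '<'
  · simp only [if_pos hc]
    cases hfind : tagTable.find? (fun p => p.1.isPrefixOf (c :: t)) <;> simp
  · simp only [if_neg hc]

-- the central equivalence, on character lists
set_option maxHeartbeats 1000000 in
theorem fold_eq_scan : ∀ cs : List Char, replFold tagTable cs = scanAux cs := by
  intro cs
  induction hn : cs.length using Nat.strong_induction_on generalizing cs with
  | _ n IH =>
    match cs with
    | [] =>
      rw [scanAux_nil]
      exact replFold_nil tagTable fun q hq => (tag_facts q hq).2.2.2.2.2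
    | c :: t =>
      rw [scanAux_cons]
      by_cases hc : c = '<'
      · subst hc
        rw [if_pos rfl]
        cases hfind : tagTable.find? (fun p => p.1.isPrefixOf ('<' :: t)) with
        | some p =>
          have hmem := List.mem_of_find?_eq_some hfind
          have hpre' := List.find?_some hfind
          have hpre : p.1.isPrefixOf ('<' :: t) = true := hpre' 
          have hlen : 0 < p.1.length :=
            List.length_pos_iff.mpr (tag_facts p hmem).2.2.2.2.2
          rw [fold_step ('<' :: t) p hmem hpre]
          congr 1
          exact IH (('<' :: t).drop p.1.length).length
            (by subst hn; simp only [List.length_drop, List.length_cons]; omega) _ rfl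
        | none =>
          have h : ∀ p ∈ tagTable, p.1.isPrefixOf ('<' :: t) = false := by
            intro p hp
            exact Bool.eq_false_iff.mpr (List.find?_eq_none.mp hfind p hp)
          rw [fold_no_match t h]
          congr 1
          exact IH t.length (by subst hn; simp) t rfl
      · rw [if_neg hc, fold_cons_ne c hc t]
        congr 1
        exact IH t.length (by subst hn; simp) t rfl

-- ===== VERDICT (by name: the statement is the Claim_ definition above) =====
set_option maxHeartbeats 1000000 in
theorem munge_html_spec : Claim_equal_munge_html := by
  intro s _
  unfold Spec_munge_html munge_html munge_html_alt
  apply String.toList_inj.mp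
  rw [String.toList_ofList, ← fold_eq_scan]
  simp only [List.foldl_cons, List.foldl_nil, PySem.Str.toList_replace]
  simp only [replFold, tagTable, List.foldl_cons, List.foldl_nil]
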